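-- pv_equiv track=rewrite | github.com/harshit-git404/adaptive-inference-selective-reprocessing | src/routing/selective_router.py | extract_uncertain_subsequence
-- ===== SOURCE A (Python) =====
-- def _normalize_indices(tokens: list[str], uncertain_indices: list[int]) -> list[int]:
--     """Return unique, valid indices sorted in original token order."""
--
--     valid_indices = {
--         index
--         for index in uncertain_indices
--         if isinstance(index, int) and 0 <= index < len(tokens)
--     }
--     return [index for index in range(len(tokens)) if index in valid_indices]
--
-- def extract_uncertain_subsequence(sentence: str, uncertain_indices: list[int]) -> str:
--     """Extract a reduced sentence containing only uncertain tokens.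
--
--     Args:
--         sentence: Original input sentence.
--         uncertain_indices: Token indices marked as uncertain.
--
--     Returns:
--         A whitespace-joined string containing only the uncertain tokens in their
--         original order. If no valid uncertain tokens are found, the original
--         sentence is returned unchanged.
--     """
--
--     # Use simple whitespace tokenization so behavior stays deterministic.
--     tokens = sentence.split()
--     if not tokens:
--         return sentence
--
--     # Remove duplicates and ignore invalid indices.
--     normalized_indices = _normalize_indices(tokens, uncertain_indices)
--     if not normalized_indices:
--         return sentence
--
--     # Collect the uncertain tokens while preserving the sentence order.
--     selected_tokens = [tokens[index] for index in normalized_indices]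
--     return " ".join(selected_tokens)
-- ===== SOURCE B (Python) =====
-- def extract_uncertain_subsequence(sentence: str, uncertain_indices: list[int]) -> str:
--     tokens = sentence.split()
--     n = len(tokens)
--     selected = [tokens[i] for i in sorted({i for i in uncertain_indices
--                                            if isinstance(i, int) and 0 <= i < n})]
--     return " ".join(selected) if selected else sentence
-- ===== Notes on version B (the rewrite author's own statement) =====
-- stated objective: simpler
-- what changed: Instead of building a set of valid indices and then scanning every token position 0..n-1 for membership (helper _normalize_indices), B sorts the deduplicated valid indices directly and indexes the token list once per selected index, in a single expression.
import Mathlib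
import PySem

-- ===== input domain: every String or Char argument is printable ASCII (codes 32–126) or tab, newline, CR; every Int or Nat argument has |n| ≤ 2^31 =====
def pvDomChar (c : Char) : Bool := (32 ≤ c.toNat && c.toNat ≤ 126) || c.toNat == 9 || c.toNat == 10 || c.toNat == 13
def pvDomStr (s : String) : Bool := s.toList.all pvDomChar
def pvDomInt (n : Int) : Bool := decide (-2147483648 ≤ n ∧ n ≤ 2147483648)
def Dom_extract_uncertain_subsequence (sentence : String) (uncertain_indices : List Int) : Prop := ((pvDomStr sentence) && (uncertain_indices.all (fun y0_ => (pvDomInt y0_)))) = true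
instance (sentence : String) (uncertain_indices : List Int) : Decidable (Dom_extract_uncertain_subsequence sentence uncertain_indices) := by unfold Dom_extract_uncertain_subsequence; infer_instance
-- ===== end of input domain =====

-- B sorts the deduplicated valid indices directly instead of scanning every token
-- position for set membership (objective: simpler — one expression, no helper).

-- ===== PORT A =====
-- port of helper _normalize_indices (the isinstance check is vacuous: every element is an int)
def normalize_indices (tokens : List String) (uncertain_indices : List Int) : List Int :=
  let valid_indices : PySem.Set Int :=
    PySem.Set.ofList (uncertain_indices.filter
      (fun index => decide (0 ≤ index) && decide (index < (tokens.length : Int))))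
  (PySem.List.pyRange 0 (tokens.length : Int) 1).filter
    (fun index => PySem.Set.contains valid_indices index)

def extract_uncertain_subsequence (sentence : String) (uncertain_indices : List Int) : String :=
  let tokens := PySem.Str.split₀ sentence
  if tokens = [] then sentence
  else
    let normalized_indices := normalize_indices tokens uncertain_indices
    if normalized_indices = [] then sentence
    else
      -- tokens[index]: index is always in range here; .getD "" is a totality guard only
      let selected_tokens := normalized_indices.map
        (fun index => (PySem.List.pyGet? tokens index).getD "")
      PySem.Str.join " " selected_tokens

-- ===== PORT B =====
def extract_uncertain_subsequence_alt (sentence : String) (uncertain_indices : List Int) : String :=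
  let tokens := PySem.Str.split₀ sentence
  let n : Int := (tokens.length : Int)
  let selected := (PySem.List.sorted
      (PySem.Set.ofList (uncertain_indices.filter (fun i => decide (0 ≤ i) && decide (i < n))))
      (fun x => x)).map
    (fun i => (PySem.List.pyGet? tokens i).getD "")
  if selected = [] then sentence else PySem.Str.join " " selected

-- ===== PRECONDITION & SPEC =====
def Spec_extract_uncertain_subsequence (sentence : String) (uncertain_indices : List Int) (out : String) : Prop := out = extract_uncertain_subsequence_alt sentence uncertain_indices
instance (sentence : String) (uncertain_indices : List Int) (out : String) : Decidable (Spec_extract_uncertain_subsequence sentence uncertain_indices out) := by unfold Spec_extract_uncertain_subsequence; infer_instance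

-- ===== CLAIM (what is proved, stated in full; the proofs are below) =====
def Claim_equal_extract_uncertain_subsequence : Prop := ∀ (sentence : String) (uncertain_indices : List Int), Dom_extract_uncertain_subsequence sentence uncertain_indices → Spec_extract_uncertain_subsequence sentence uncertain_indices (extract_uncertain_subsequence sentence uncertain_indices)

-- ===== LEMMAS AND PROOFS =====

-- The scan over all token positions kept exactly the valid indices in increasing
-- order, i.e. sorted(set(valid indices)).
lemma normalized_eq_sorted (tokens : List String) (uncertain_indices : List Int) :
    normalize_indices tokens uncertain_indices
      = PySem.List.sorted
          (PySem.Set.ofList (uncertain_indices.filter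
            (fun i => decide (0 ≤ i) && decide (i < (tokens.length : Int)))))
          (fun x => x) := by
  unfold normalize_indices
  dsimp only
  symm
  apply PySem.List.sorted_eq_of_perm_of_pairwise_lt
  · rw [List.perm_ext_iff_of_nodup
      ((PySem.List.nodup_pyRange_one 0 _).filter _) (PySem.Set.nodup_ofList _)]
    intro i
    simp only [List.mem_filter, PySem.List.mem_pyRange_one, PySem.Set.mem_ofList,
      PySem.Set.contains_iff, Bool.and_eq_true, decide_eq_true_eq]
    tauto
  · exact (PySem.List.pairwise_lt_pyRange_one 0 _).filter _

theorem extract_uncertain_subsequence_spec' (sentence : String) (uncertain_indices : List Int) :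
    extract_uncertain_subsequence sentence uncertain_indices
      = extract_uncertain_subsequence_alt sentence uncertain_indices := by
  unfold extract_uncertain_subsequence extract_uncertain_subsequence_alt
  dsimp only
  rw [← normalized_eq_sorted]
  by_cases h : PySem.Str.split₀ sentence = []
  · simp only [h]
    have : normalize_indices ([] : List String) uncertain_indices = [] := by
      unfold normalize_indices
      simp [PySem.List.pyRange_one_eq_nil (le_refl (0 : Int))]
    simp [this]
  · simp only [h]
    by_cases hn : normalize_indices (PySem.Str.split₀ sentence) uncertain_indices = []
    · simp [hn]
    · simp [hn, List.map_eq_nil_iff]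

-- ===== VERDICT (by name: the statement is the Claim_ definition above) =====
theorem extract_uncertain_subsequence_spec : Claim_equal_extract_uncertain_subsequence := by
  intro sentence uncertain_indices _
  exact extract_uncertain_subsequence_spec' sentence uncertain_indices
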